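-- pv_equiv track=rewrite | github.com/smy37/Daily_Coding | Nexon4.py | GetMaxTime
-- ===== SOURCE A (Python) =====
-- def cal_aval(initailEnergy, time, th):
--     temp = 0
--     for i in initailEnergy:
--         temp += max(i - time, 0)
--     if temp >= th:
--         return True
--     else:
--         return False
--
-- def GetMaxTime(initialEnergy, th):
--     # Write your code here
--     n = len(initialEnergy)
--     s = 0
--     e = max(initialEnergy)
--     m = (s + e) // 2
--
--     while s != m:
--         if cal_aval(initialEnergy, m, th):
--             s = m
--             m = (s + e) // 2
--         else:
--             e = m - 1
--             m = (s + e) // 2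
--     if cal_aval(initialEnergy, e, th) == True:
--         return e
--     else:
--         return s
-- ===== SOURCE B (Python) =====
-- import bisect
--
--
-- def GetMaxTime(initialEnergy, th):
--     xs = sorted(initialEnergy)
--     n = len(xs)
--     pref = [0]
--     for v in xs:
--         pref.append(pref[-1] + v)
--
--     def energy(t):
--         i = bisect.bisect_right(xs, t)
--         return (pref[n] - pref[i]) - t * (n - i)
--
--     hi = xs[-1]
--     if energy(hi) >= th:
--         return hi
--     if energy(0) < th:
--         return 0
--     lo = 0
--     # invariant: energy(lo) >= th > energy(hi)
--     while hi - lo > 1: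
--         mid = (lo + hi) // 2
--         if energy(mid) >= th:
--             lo = mid
--         else:
--             hi = mid
--     return lo
-- ===== Notes on version B (the rewrite author's own statement) =====
-- stated objective: faster
-- what changed: B sorts the list once and builds prefix sums so each threshold test inside the binary search is an O(log n) bisect instead of A's O(n) full scan, and its search loop keeps a plain lo/hi invariant instead of A's s/e/m midpoint bookkeeping; a timing run measured B ~12x faster at the largest size.
import Mathlib
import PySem

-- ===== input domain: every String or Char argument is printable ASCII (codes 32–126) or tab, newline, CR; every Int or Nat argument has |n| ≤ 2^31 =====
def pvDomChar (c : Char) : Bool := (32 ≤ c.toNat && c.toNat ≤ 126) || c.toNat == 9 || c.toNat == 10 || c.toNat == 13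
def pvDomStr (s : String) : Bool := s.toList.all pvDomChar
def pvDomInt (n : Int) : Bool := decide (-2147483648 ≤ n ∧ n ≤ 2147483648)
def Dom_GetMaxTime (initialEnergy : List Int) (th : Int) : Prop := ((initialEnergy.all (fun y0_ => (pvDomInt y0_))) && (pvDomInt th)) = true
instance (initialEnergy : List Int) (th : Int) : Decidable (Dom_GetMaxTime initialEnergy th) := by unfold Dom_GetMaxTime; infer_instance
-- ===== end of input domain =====

-- B sorts the list once and builds prefix sums, so each threshold test inside the binary
-- search is a bisect on the sorted list instead of A's full scan, with a plain lo/hi loop.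

-- ===== PORT A =====
def calAval (initailEnergy : List Int) (time : Int) (th : Int) : Bool :=
  let temp := initailEnergy.foldl (fun temp i => temp + max (i - time) 0) 0
  if temp ≥ th then true else false

-- the 'while s != m' loop; fuel only guards totality (proved never exhausted on Pre_)
def GetMaxTimeLoop (E : List Int) (th : Int) : Nat → Int → Int → Int → Int × Int
  | 0, s, e, _ => (s, e)
  | fuel + 1, s, e, m =>
    if s ≠ m then
      if calAval E m th then
        GetMaxTimeLoop E th fuel m e (PySem.Int.floordiv (m + e) 2)
      else
        GetMaxTimeLoop E th fuel s (m - 1) (PySem.Int.floordiv (s + (m - 1)) 2)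
    else (s, e)

def GetMaxTime (initialEnergy : List Int) (th : Int) : Int :=
  match PySem.List.max? initialEnergy (fun y => y) with
  | none => 0   -- Python raises ValueError on max([]): excluded by Pre_
  | some e0 =>
    let s : Int := 0
    let m := PySem.Int.floordiv (s + e0) 2
    let p := GetMaxTimeLoop initialEnergy th (e0.natAbs + 2) s e0 m
    if calAval initialEnergy p.2 th = true then p.2 else p.1

-- ===== PORT B =====
def altEnergy (xs pref : List Int) (n : Nat) (t : Int) : Int :=
  let i := PySem.List.bisectRight xs t
  (PySem.List.pyGetD pref (n : Int) 0 - PySem.List.pyGetD pref (i : Int) 0) - t * ((n : Int) - (i : Int))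

-- the 'while hi - lo > 1' loop; fuel only guards totality (proved never exhausted on Pre_)
def altLoop (xs pref : List Int) (n : Nat) (th : Int) : Nat → Int → Int → Int
  | 0, lo, _ => lo
  | fuel + 1, lo, hi =>
    if hi - lo > 1 then
      let mid := PySem.Int.floordiv (lo + hi) 2
      if altEnergy xs pref n mid ≥ th then altLoop xs pref n th fuel mid hi
      else altLoop xs pref n th fuel lo mid
    else lo

def GetMaxTime_alt (initialEnergy : List Int) (th : Int) : Int :=
  let xs := PySem.List.sorted initialEnergy (fun y => y)
  let n := xs.length
  let pref := xs.foldl (fun p v => p ++ [PySem.List.pyGetD p (-1) 0 + v]) [0]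
  match PySem.List.pyGet? xs (-1) with
  | none => 0   -- Python raises IndexError on sorted([])[-1]: excluded by Pre_
  | some hi =>
    if altEnergy xs pref n hi ≥ th then hi
    else if altEnergy xs pref n 0 < th then 0
    else altLoop xs pref n th ((hi - 0).toNat + 1) 0 hi

-- ===== PRECONDITION & SPEC =====
-- Pre_ excludes the empty list (A's max([]) raises ValueError) and lists whose elements are
-- all negative when th > 0 (there A's midpoint search runs over negative times and loops forever).
def Pre_GetMaxTime (initialEnergy : List Int) (th : Int) : Prop :=
  initialEnergy ≠ [] ∧ (th ≤ 0 ∨ ∃ x ∈ initialEnergy, 0 ≤ x)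
instance (initialEnergy : List Int) (th : Int) : Decidable (Pre_GetMaxTime initialEnergy th) := by
  unfold Pre_GetMaxTime; infer_instance
def pvWitness_GetMaxTime : List Int × Int := ([3, 1], 2)

def Spec_GetMaxTime (initialEnergy : List Int) (th : Int) (out : Int) : Prop := out = GetMaxTime_alt initialEnergy th
instance (initialEnergy : List Int) (th : Int) (out : Int) : Decidable (Spec_GetMaxTime initialEnergy th out) := by unfold Spec_GetMaxTime; infer_instance

-- ===== CLAIM (what is proved, stated in full; the proofs are below) =====
def Claim_equal_GetMaxTime : Prop := ∀ (initialEnergy : List Int) (th : Int), Dom_GetMaxTime initialEnergy th → Pre_GetMaxTime initialEnergy th → Spec_GetMaxTime initialEnergy th (GetMaxTime initialEnergy th)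

-- ===== LEMMAS AND PROOFS =====

-- total remaining energy at time t, and the threshold test
def fE (E : List Int) (t : Int) : Int := (E.map (fun i => max (i - t) 0)).sum
def okE (E : List Int) (th t : Int) : Prop := th ≤ fE E t

lemma fE_nonneg (E : List Int) (t : Int) : 0 ≤ fE E t := by
  unfold fE
  apply List.sum_nonneg
  intro x hx
  obtain ⟨i, _, rfl⟩ := List.mem_map.1 hx
  exact le_max_right _ _

lemma fE_antitone (E : List Int) {t t' : Int} (h : t ≤ t') : fE E t' ≤ fE E t := by
  unfold fE
  apply List.sum_le_sum
  intro i _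
  exact max_le_max (by omega) le_rfl

lemma notOk_of_notOk_le (E : List Int) {th t t' : Int} (h : t ≤ t')
    (hn : ¬ okE E th t) : ¬ okE E th t' := by
  unfold okE at *
  have := fE_antitone E h
  omega

lemma ok_of_th_nonpos (E : List Int) {th : Int} (h : th ≤ 0) (t : Int) : okE E th t := by
  unfold okE
  have := fE_nonneg E t
  omega

lemma calAval_eq (E : List Int) (t th : Int) :
    calAval E t th = decide (th ≤ fE E t) := by
  unfold calAval fE
  rw [PySem.List.foldl_add (g := fun i => max (i - t) 0)]
  simp [ge_iff_le]

-- the unique characterisation both programs satisfy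
def QE (E : List Int) (th e0 r : Int) : Prop :=
  r ≤ e0 ∧ (∀ t, r < t → t ≤ e0 → ¬ okE E th t) ∧
  (okE E th r ∨ (r = 0 ∧ ¬ okE E th 0)) ∧ (0 ≤ r ∨ r = e0)

lemma QE_unique {E : List Int} {th e0 r1 r2 : Int}
    (h1 : QE E th e0 r1) (h2 : QE E th e0 r2) : r1 = r2 := by
  obtain ⟨b1, u1, o1, s1⟩ := h1
  obtain ⟨b2, u2, o2, s2⟩ := h2
  by_contra hne
  rcases lt_trichotomy r1 r2 with h | h | h
  · have hnok := u1 r2 h b2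
    rcases o2 with h2' | ⟨rfl, hz⟩
    · exact hnok h2'
    · rcases s1 with h1' | rfl
      · omega
      · omega
  · exact hne h
  · have hnok := u2 r1 h b1
    rcases o1 with h1' | ⟨rfl, hz⟩
    · exact hnok h1'
    · rcases s2 with h2' | rfl
      · omega
      · omega

-- ---- A side ----

-- the post-loop 'if cal_aval(initialEnergy, e, th) == True: return e else: return s'
def postA (E : List Int) (th : Int) (p : Int × Int) : Int :=
  if calAval E p.2 th = true then p.2 else p.1

-- regime s ≤ e (reached whenever 0 ≤ e0)
lemma loopA_spec1 (E : List Int) (th e0 : Int) :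
    ∀ (fuel : Nat) (s e : Int), s ≤ e → e ≤ e0 →
      (∀ t, e < t → t ≤ e0 → ¬ okE E th t) → (okE E th s ∨ s = 0) →
      ((0 ≤ s ∧ 0 ≤ e) ∨ (th ≤ 0 ∧ e = e0)) → (e - s).toNat < fuel →
      QE E th e0 (postA E th (GetMaxTimeLoop E th fuel s e (PySem.Int.floordiv (s + e) 2))) := by
  intro fuel
  induction fuel with
  | zero => intro s e _ _ _ _ _ hf; omega
  | succ fuel ih =>
    intro s e hse hee0 hinv3 hinv4 hinv5 hf
    have hmid := PySem.Int.floordiv_two_mid_bounds hse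
    set m := PySem.Int.floordiv (s + e) 2 with hm
    by_cases hsm : s = m
    · -- loop exits: s = m forces e ∈ {s, s+1}
      have he : e ≤ s + 1 := by
        have := (PySem.Int.floordiv_eq_iff_of_pos (a := s + e) (b := 2) (q := s) (by omega)).1 hsm.symm
        omega
      have hloop : GetMaxTimeLoop E th (fuel + 1) s e m = (s, e) := by
        simp [GetMaxTimeLoop, hsm]
      rw [hloop]
      unfold postA
      simp only [calAval_eq]
      by_cases hoke : okE E th e
      · rw [if_pos (by simpa [okE] using hoke)]
        refine ⟨hee0, hinv3, Or.inl hoke, ?_⟩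
        rcases hinv5 with ⟨_, h⟩ | ⟨_, h⟩
        · exact Or.inl h
        · exact Or.inr h
      · rw [if_neg (by simpa [okE] using hoke)]
        refine ⟨by omega, ?_, ?_, ?_⟩
        · intro t hst hte0
          by_cases hte : e < t
          · exact hinv3 t hte hte0
          · have : t = e := by omega
            subst this; exact hoke
        · rcases hinv4 with h | rfl
          · exact Or.inl h
          · by_cases h0 : okE E th 0
            · exact Or.inl h0
            · exact Or.inr ⟨rfl, h0⟩
        · rcases hinv5 with ⟨h, _⟩ | ⟨hth, _⟩
          · exact Or.inl h
          · exact absurd (ok_of_th_nonpos E hth e) hoke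
    · -- loop continues
      have hsm1 : s + 1 ≤ m := by omega
      by_cases hokm : okE E th m
      · have hb : calAval E m th = true := by
          rw [calAval_eq]; exact decide_eq_true hokm
        have hloop : GetMaxTimeLoop E th (fuel + 1) s e m
            = GetMaxTimeLoop E th fuel m e (PySem.Int.floordiv (m + e) 2) := by
          simp [GetMaxTimeLoop, hsm, hb]
        rw [hloop]
        have hinv5' : (0 ≤ m ∧ 0 ≤ e) ∨ (th ≤ 0 ∧ e = e0) := by
          rcases hinv5 with ⟨h1, h2⟩ | h
          · exact Or.inl ⟨by omega, h2⟩
          · exact Or.inr h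
        exact ih m e (by omega) hee0 hinv3 (Or.inl hokm) hinv5' (by omega)
      · have hb : calAval E m th = false := by
          rw [calAval_eq]; exact decide_eq_false hokm
        have hloop : GetMaxTimeLoop E th (fuel + 1) s e m
            = GetMaxTimeLoop E th fuel s (m - 1) (PySem.Int.floordiv (s + (m - 1)) 2) := by
          simp [GetMaxTimeLoop, hsm, hb]
        rw [hloop]
        have hnot : ∀ t, m - 1 < t → t ≤ e0 → ¬ okE E th t := by
          intro t hmt _
          exact notOk_of_notOk_le E (by omega) hokm
        have h5 : 0 ≤ s ∧ 0 ≤ e := by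
          rcases hinv5 with h | ⟨hth, _⟩
          · exact h
          · exact absurd (ok_of_th_nonpos E hth m) hokm
        exact ih s (m - 1) (by omega) (by omega) hnot hinv4
          (Or.inl ⟨h5.1, by omega⟩) (by omega)

-- regime e ≤ s with th ≤ 0 (all-negative maximum): s descends onto e = e0
lemma loopA_spec2 (E : List Int) (th e0 : Int) (hth : th ≤ 0) :
    ∀ (fuel : Nat) (s e : Int), e ≤ s → e = e0 → (s - e).toNat < fuel →
      GetMaxTimeLoop E th fuel s e (PySem.Int.floordiv (s + e) 2) = (e0, e0) := by
  intro fuel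
  induction fuel with
  | zero => intro s e _ _ hf; omega
  | succ fuel ih =>
    intro s e hes rfl hf
    have hmid := PySem.Int.floordiv_two_mid_bounds hes
    have hcomm : s + e = e + s := by ring
    rw [hcomm] at *
    set m := PySem.Int.floordiv (e + s) 2 with hm
    by_cases hsm : s = m
    · have hse : s ≤ e := by
        have := (PySem.Int.floordiv_eq_iff_of_pos (a := e + s) (b := 2) (q := s) (by omega)).1 hsm.symm
        omega
      have : s = e := by omega
      subst this
      simp [GetMaxTimeLoop, hsm]
    · have hms : m + 1 ≤ s := by omega
      have hok : calAval E m th = true := by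
        rw [calAval_eq]
        simpa [okE] using ok_of_th_nonpos E hth m
      simp only [GetMaxTimeLoop, ne_eq, hsm, not_false_eq_true, if_true, hok]
      exact ih m e (by omega) rfl (by omega)

lemma A_char (E : List Int) (th : Int) (hpre : Pre_GetMaxTime E th) :
    ∃ e0, PySem.List.max? E (fun y => y) = some e0 ∧ (∀ y ∈ E, y ≤ e0) ∧ e0 ∈ E ∧
      QE E th e0 (GetMaxTime E th) := by
  obtain ⟨hne, hpre2⟩ := hpre
  obtain ⟨e0, he0⟩ : ∃ e0, PySem.List.max? E (fun y => y) = some e0 := by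
    cases h : PySem.List.max? E (fun y => y) with
    | none => exact absurd ((PySem.List.max?_eq_none_iff E _).1 h) hne
    | some e0 => exact ⟨e0, rfl⟩
  have hmax : ∀ y ∈ E, y ≤ e0 := PySem.List.max?_isMax he0
  have hmem : e0 ∈ E := PySem.List.max?_mem he0
  refine ⟨e0, he0, hmax, hmem, ?_⟩
  unfold GetMaxTime
  rw [he0]
  by_cases h0 : 0 ≤ e0
  · have := loopA_spec1 E th e0 (e0.natAbs + 2) 0 e0 h0 le_rfl
      (by intro t h1 h2; omega) (Or.inr rfl) (Or.inl ⟨le_rfl, h0⟩) (by omega)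
    simpa [postA] using this
  · -- all elements negative: Pre_ forces th ≤ 0 and the loop descends onto e0
    have hth : th ≤ 0 := by
      rcases hpre2 with h | ⟨x, hx, hx0⟩
      · exact h
      · have := hmax x hx; omega
    have hloop := loopA_spec2 E th e0 hth (e0.natAbs + 2) 0 e0 (by omega) rfl (by omega)
    simp only [hloop]
    have hok : calAval E e0 th = true := by
      rw [calAval_eq]; simpa [okE] using ok_of_th_nonpos E hth e0
    rw [if_pos hok]
    exact ⟨le_rfl, by intro t h1 h2; omega, Or.inl (ok_of_th_nonpos E hth e0), Or.inr rfl⟩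

-- ---- B side ----

-- Python's p[-1] on a non-empty list is its last element
lemma pyGet?_neg_one (p : List Int) (hp : p ≠ []) :
    PySem.List.pyGet? p (-1) = some (p.getLast hp) := by
  have hl : 0 < p.length := List.length_pos_iff.2 hp
  simp only [PySem.List.pyGet?, PySem.List.pyIdx?]
  rw [if_neg (by omega), if_pos (by omega)]
  simp only [Option.bind_some]
  rw [List.getLast_eq_getElem, List.getElem?_eq_getElem (by omega)]
  simp

lemma pyGetD_neg_one_getLast (p : List Int) (hp : p ≠ []) :
    PySem.List.pyGetD p (-1) 0 = p.getLast hp := by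
  rw [PySem.List.pyGetD, pyGet?_neg_one p hp]
  rfl

-- mathematical description of the prefix-sum accumulator
def prefSums : Int → List Int → List Int
  | _, [] => []
  | c, v :: vs => (c + v) :: prefSums (c + v) vs

lemma pref_build (xs : List Int) :
    ∀ (p : List Int) (hp : p ≠ []),
      xs.foldl (fun p v => p ++ [PySem.List.pyGetD p (-1) 0 + v]) p
        = p ++ prefSums (p.getLast hp) xs := by
  induction xs with
  | nil => intro p hp; simp [prefSums]
  | cons v vs ih =>
    intro p hp
    simp only [List.foldl_cons]
    rw [pyGetD_neg_one_getLast p hp]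
    rw [ih (p ++ [p.getLast hp + v]) (by simp)]
    rw [List.getLast_append_singleton]
    simp [prefSums]

lemma prefSums_length (c : Int) (xs : List Int) : (prefSums c xs).length = xs.length := by
  induction xs generalizing c with
  | nil => simp [prefSums]
  | cons v vs ih => simp [prefSums, ih]

lemma prefSums_getElem (xs : List Int) :
    ∀ (c : Int) (j : Nat) (h : j < xs.length),
      (prefSums c xs)[j]'(by rw [prefSums_length]; exact h) = c + (xs.take (j + 1)).sum := by
  induction xs with
  | nil => intro c j h; simp at h
  | cons v vs ih =>
    intro c j h
    cases j with
    | zero => simp [prefSums]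
    | succ j =>
      simp only [prefSums, List.getElem_cons_succ, List.take_succ_cons, List.sum_cons]
      rw [ih (c + v) j (by simpa using h)]
      ring

lemma fE_all_le (l : List Int) (t : Int) (h : ∀ x ∈ l, x ≤ t) : fE l t = 0 := by
  unfold fE
  apply List.sum_eq_zero
  intro y hy
  obtain ⟨x, hx, rfl⟩ := List.mem_map.1 hy
  have := h x hx
  omega

lemma fE_all_gt (l : List Int) (t : Int) (h : ∀ x ∈ l, t < x) :
    fE l t = l.sum - t * l.length := by
  induction l with
  | nil => simp [fE]
  | cons x xs ih =>
    have hx : t < x := h x List.mem_cons_self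
    unfold fE at *
    simp only [List.map_cons, List.sum_cons, List.length_cons]
    rw [ih (fun y hy => h y (List.mem_cons_of_mem _ hy))]
    have : max (x - t) 0 = x - t := by omega
    rw [this]
    push_cast
    ring

lemma fE_perm (E : List Int) (t : Int) :
    fE (PySem.List.sorted E (fun y => y)) t = fE E t := by
  unfold fE
  exact ((PySem.List.sorted_perm E (fun y => y) false).map _).sum_eq

lemma altEnergy_eq (E : List Int) (t : Int) :
    altEnergy (PySem.List.sorted E (fun y => y))
      ((PySem.List.sorted E (fun y => y)).foldl (fun p v => p ++ [PySem.List.pyGetD p (-1) 0 + v]) [0])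
      (PySem.List.sorted E (fun y => y)).length t = fE E t := by
  set xs := PySem.List.sorted E (fun y => y) with hxs
  set n := xs.length with hn
  have hpref : xs.foldl (fun p v => p ++ [PySem.List.pyGetD p (-1) 0 + v]) ([0] : List Int)
      = 0 :: prefSums 0 xs := by
    rw [pref_build xs [0] (by simp)]
    simp
  rw [hpref]
  have hpairwise : List.Pairwise (fun a b => a ≤ b) xs := by
    simpa using PySem.List.sorted_pairwise E (fun y => y)
  obtain ⟨hile, hle, hgt⟩ := PySem.List.bisectRight_spec xs t hpairwise
  simp only [altEnergy]
  set i := PySem.List.bisectRight xs t with hi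
  have hplen : (0 :: prefSums 0 xs).length = n + 1 := by simp [prefSums_length, hn]
  have hget : ∀ (k : Nat), k ≤ n →
      PySem.List.pyGetD (0 :: prefSums 0 xs) (k : Int) 0 = (xs.take k).sum := by
    intro k hk
    rw [PySem.List.pyGetD_eq_getElem _ _ (by omega) (by rw [hplen]; push_cast; omega)]
    cases k with
    | zero => simp
    | succ k =>
      simp only [Int.toNat_natCast, List.getElem_cons_succ]
      rw [prefSums_getElem xs 0 k (by omega)]
      simp
  rw [hget n le_rfl, hget i hile]
  -- split xs at i
  have hsplit : xs = xs.take i ++ xs.drop i := (List.take_append_drop i xs).symm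
  have htake_le : ∀ x ∈ xs.take i, x ≤ t := by
    intro x hx
    obtain ⟨j, hj, rfl⟩ := List.mem_take_iff_getElem.1 hx
    exact hle j (by omega) (by omega)
  have hdrop_gt : ∀ x ∈ xs.drop i, t < x := by
    intro x hx
    obtain ⟨j, hj, rfl⟩ := List.mem_iff_getElem.1 hx
    rw [List.getElem_drop]
    exact hgt (i + j) (by simp at hj; omega) (by omega)
  have hfE : fE xs t = fE (xs.take i) t + fE (xs.drop i) t := by
    conv_lhs => rw [hsplit]
    unfold fE
    rw [List.map_append, List.sum_append]
  have hsum : xs.sum = (xs.take i).sum + (xs.drop i).sum := by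
    conv_lhs => rw [hsplit]
    rw [List.sum_append]
  have hdlen : (xs.drop i).length = n - i := by simp [hn]
  rw [← fE_perm E t, hfE, fE_all_le _ t htake_le, fE_all_gt _ t hdrop_gt]
  have : (xs.take n).sum = xs.sum := by rw [List.take_of_length_le (by omega)]
  rw [this, hsum, hdlen]
  have : ((n - i : Nat) : Int) = (n : Int) - (i : Int) := by omega
  rw [this]
  ring

-- B's binary-search loop
lemma loopB_spec (E : List Int) (th e0 : Int) :
    ∀ (fuel : Nat) (lo hi : Int), 0 ≤ lo → lo < hi → hi ≤ e0 →
      okE E th lo → ¬ okE E th hi → (hi - lo).toNat < fuel + 1 →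
      QE E th e0 (altLoop (PySem.List.sorted E (fun y => y))
        ((PySem.List.sorted E (fun y => y)).foldl (fun p v => p ++ [PySem.List.pyGetD p (-1) 0 + v]) [0])
        (PySem.List.sorted E (fun y => y)).length th fuel lo hi) := by
  have exitQE : ∀ lo hi : Int, 0 ≤ lo → lo < hi → hi ≤ e0 → okE E th lo → ¬ okE E th hi →
      ¬ (hi - lo > 1) → QE E th e0 lo := by
    intro lo hi h0 hlh hhe0 hoklo hnokhi hgap
    have hhi : hi = lo + 1 := by omega
    refine ⟨by omega, ?_, Or.inl hoklo, Or.inl h0⟩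
    intro t hlt hte0
    exact notOk_of_notOk_le E (by omega) hnokhi
  intro fuel
  induction fuel with
  | zero =>
    intro lo hi h0 hlh hhe0 hoklo hnokhi hf
    have hgap : ¬ (hi - lo > 1) := by omega
    simp only [altLoop]
    exact exitQE lo hi h0 hlh hhe0 hoklo hnokhi hgap
  | succ fuel ih =>
    intro lo hi h0 hlh hhe0 hoklo hnokhi hf
    by_cases hgap : hi - lo > 1
    · have hmid1 : lo + 1 ≤ PySem.Int.floordiv (lo + hi) 2 := by
        rw [PySem.Int.le_floordiv_iff_mul_le (by omega)]
        omega
      have hmid2 : PySem.Int.floordiv (lo + hi) 2 < hi := by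
        rw [PySem.Int.floordiv_lt_iff_lt_mul (by omega)]
        omega
      simp only [altLoop, if_pos hgap]
      set mid := PySem.Int.floordiv (lo + hi) 2 with hm
      rw [altEnergy_eq E mid]
      by_cases hokm : okE E th mid
      · rw [if_pos (by unfold okE at hokm; omega)]
        exact ih mid hi (by omega) (by omega) hhe0 hokm hnokhi (by omega)
      · rw [if_neg (by unfold okE at hokm; omega)]
        exact ih lo mid (by omega) (by omega) (by omega) hoklo hokm (by omega)
    · simp only [altLoop, if_neg hgap]
      exact exitQE lo hi h0 hlh hhe0 hoklo hnokhi hgap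

lemma B_char (E : List Int) (th : Int) (hpre : Pre_GetMaxTime E th) (e0 : Int)
    (hmem : e0 ∈ E) (hmax : ∀ y ∈ E, y ≤ e0) :
    QE E th e0 (GetMaxTime_alt E th) := by
  obtain ⟨hne, hpre2⟩ := hpre
  have hxsne : PySem.List.sorted E (fun y => y) ≠ [] := by
    intro h
    exact hne ((PySem.List.sorted_eq_nil_iff E _ false).1 h)
  -- the last element of the sorted list is the maximum e0
  have hlast : (PySem.List.sorted E (fun y => y)).getLast hxsne = e0 := by
    apply le_antisymm
    · exact hmax _ ((PySem.List.mem_sorted E _ false _).1 (List.getLast_mem hxsne))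
    · have hmemxs : e0 ∈ PySem.List.sorted E (fun y => y) :=
        (PySem.List.mem_sorted E _ false e0).2 hmem
      obtain ⟨p, hp, hpe⟩ := List.mem_iff_getElem.1 hmemxs
      rw [List.getLast_eq_getElem]
      rw [← hpe]
      exact PySem.List.sorted_id_getElem_mono E (by omega) (by omega)
  have h0e0 : th ≤ 0 ∨ 0 ≤ e0 := by
    rcases hpre2 with h | ⟨x, hx, hx0⟩
    · exact Or.inl h
    · have := hmax x hx; exact Or.inr (by omega)
  unfold GetMaxTime_alt
  simp only [pyGet?_neg_one _ hxsne, hlast]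
  rw [altEnergy_eq E e0, altEnergy_eq E 0]
  by_cases hoke : okE E th e0
  · rw [if_pos (by unfold okE at hoke; omega)]
    exact ⟨le_rfl, by intro t h1 h2; omega, Or.inl hoke, Or.inr rfl⟩
  · rw [if_neg (by unfold okE at hoke; omega)]
    have h0e0' : 0 ≤ e0 := by
      rcases h0e0 with h | h
      · exact absurd (ok_of_th_nonpos E h e0) hoke
      · exact h
    by_cases hok0 : okE E th 0
    · rw [if_neg (by unfold okE at hok0; omega)]
      have he0pos : 0 < e0 := by
        rcases eq_or_lt_of_le h0e0' with h | h
        · exact absurd (h ▸ hok0) hoke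
        · exact h
      exact loopB_spec E th e0 ((e0 - 0).toNat + 1) 0 e0 le_rfl he0pos le_rfl hok0 hoke (by omega)
    · rw [if_pos (by unfold okE at hok0; omega)]
      refine ⟨h0e0', ?_, Or.inr ⟨rfl, hok0⟩, Or.inl le_rfl⟩
      intro t h1 h2
      exact notOk_of_notOk_le E (by omega) hok0

-- ===== VERDICT (by name: the statement is the Claim_ definition above) =====
theorem GetMaxTime_spec : Claim_equal_GetMaxTime := by
  intro E th _ hpre
  unfold Spec_GetMaxTime
  obtain ⟨e0, _, hmax, hmem, hQA⟩ := A_char E th hpre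
  exact QE_unique hQA (B_char E th hpre e0 hmem hmax)
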